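-- pv_equiv track=rewrite | github.com/JongSeongYang/CodingTest | src/programmers/python/lv1/Pg160586.py | solution
-- ===== SOURCE A (Python) =====
-- def solution(keymap, targets):
--     answer = []
--     for target in targets:
--         tabs = 0
--         for t in target:  # 각 글자들에 대해서
--             tab = 101
--             flag = False
--             for j in range(len(keymap)):  # 자판별로 몇번 눌러야 하는지 확인
--                 if t in keymap[j]:
--                     tab = min(keymap[j].index(t) + 1, tab)
--                     flag = True
--
--             if not flag:
--                 tabs = -1
--                 break
--             tabs += tab
--         answer.append(tabs)
--     return answer
-- ===== SOURCE B (Python) =====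
-- def solution(keymap, targets):
--     table = {}
--     for s in keymap:
--         for pos, ch in enumerate(s):
--             table[ch] = min(table.get(ch, 101), pos + 1)
--     return [sum(table[ch] for ch in t) if all(ch in table for ch in t) else -1
--             for t in targets]
-- ===== Notes on version B (the rewrite author's own statement) =====
-- stated objective: faster
-- what changed: Builds a char->min-taps dict in one preprocessing pass over the keymaps, then answers each target by O(1) table lookups (all/sum), removing A's inner scan of every keymap (with a substring search and .index) per target character.
import Mathlib
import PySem

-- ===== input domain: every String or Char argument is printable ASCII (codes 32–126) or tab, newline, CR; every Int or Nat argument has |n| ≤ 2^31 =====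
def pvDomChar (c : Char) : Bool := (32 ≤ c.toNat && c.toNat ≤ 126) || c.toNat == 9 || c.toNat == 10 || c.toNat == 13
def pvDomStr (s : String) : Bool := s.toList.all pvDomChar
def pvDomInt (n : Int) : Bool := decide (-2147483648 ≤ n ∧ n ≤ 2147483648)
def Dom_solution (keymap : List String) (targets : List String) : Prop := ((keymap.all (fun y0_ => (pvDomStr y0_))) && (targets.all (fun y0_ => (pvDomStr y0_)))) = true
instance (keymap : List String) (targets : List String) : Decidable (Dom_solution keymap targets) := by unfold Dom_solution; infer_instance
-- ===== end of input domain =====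

-- B replaces A's per-target-character scan of all keymaps by a dict of minimal tap
-- counts built once over the keymaps, then pure lookups per target (objective: faster).

-- ===== PORT A =====
-- inner 'for j in range(len(keymap))' loop of A for one character t;
-- 't in keymap[j]' / 'keymap[j].index(t)' for the single character t are ported as
-- List.contains / PySem.List.index? on the string's characters (exact for a 1-char needle).
def solutionChar (keymap : List String) (t : Char) : Int × Bool :=
  (PySem.List.pyRange 0 (keymap.length : Int) 1).foldl
    (fun (st : Int × Bool) j =>
      let s := (PySem.List.pyGetD keymap j "").toList
      if s.contains t then
        (min (((PySem.List.index? s t).getD 0 : Int) + 1) st.1, true)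
      else st)
    (101, false)

-- 'for t in target' loop with its break
def solutionTabs (keymap : List String) : List Char → Int → Int
  | [], tabs => tabs
  | t :: rest, tabs =>
    let st := solutionChar keymap t
    if !st.2 then -1 else solutionTabs keymap rest (tabs + st.1)

def solution (keymap : List String) (targets : List String) : List Int :=
  targets.foldl (fun answer target => answer ++ [solutionTabs keymap target.toList 0]) []

-- ===== PORT B =====
def altTable (keymap : List String) : PySem.Dict Char Int :=
  keymap.foldl
    (fun tb s =>
      (PySem.List.enumerate s.toList 0).foldl
        (fun (tb : PySem.Dict Char Int) p => tb.insert p.2 (min (tb.getD p.2 101) (p.1 + 1)))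
        tb)
    PySem.Dict.empty

def solution_alt (keymap : List String) (targets : List String) : List Int :=
  let tb := altTable keymap
  targets.map (fun t =>
    if t.toList.all (fun ch => tb.contains ch) then
      (t.toList.map (fun ch => tb.getD ch 101)).sum
    else -1)

-- ===== PRECONDITION & SPEC =====
def Spec_solution (keymap : List String) (targets : List String) (out : List Int) : Prop := out = solution_alt keymap targets
instance (keymap : List String) (targets : List String) (out : List Int) : Decidable (Spec_solution keymap targets out) := by unfold Spec_solution; infer_instance

-- ===== CLAIM (what is proved, stated in full; the proofs are below) =====
def Claim_equal_solution : Prop := ∀ (keymap : List String) (targets : List String), Dom_solution keymap targets → Spec_solution keymap targets (solution keymap targets)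

-- ===== LEMMAS AND PROOFS =====

def bestFold (t : Char) (keymap : List String) (a : Int) : Int :=
  keymap.foldl (fun a s => if s.toList.contains t then min ((s.toList.idxOf t : Int) + 1) a else a) a


-- A-side inner loop, rewritten as a fold over the keymap list
theorem getD_idxOf? (cs : List Char) (t : Char) (h : t ∈ cs) :
    (cs.idxOf? t).getD 0 = cs.idxOf t := by
  obtain ⟨k, hk⟩ := Option.isSome_iff_exists.mp (List.isSome_idxOf?.mpr h)
  simp [List.idxOf_eq_getD_idxOf?, hk]

def f2 (t : Char) : Int × Bool → String → Int × Bool := fun st s =>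
  if s.toList.contains t then
    (min (((PySem.List.index? s.toList t).getD 0 : Int) + 1) st.1, true)
  else st

theorem pairFold (t : Char) (keymap : List String) (a : Int) (b : Bool) :
    keymap.foldl (f2 t) (a, b) =
      (bestFold t keymap a, b || keymap.any (fun s => s.toList.contains t)) := by
  induction keymap generalizing a b with
  | nil => simp [bestFold]
  | cons s l ih =>
    simp only [List.foldl_cons, List.any_cons, f2, bestFold, PySem.List.index?_eq_idxOf?]
    simp only [bestFold] at ih
    by_cases h : s.toList.contains t
    · rw [if_pos h, if_pos h, getD_idxOf? _ _ (by simpa using h), ih]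
      have hm : t ∈ s.toList := by simpa using h
      simp [hm]
    · rw [if_neg h, if_neg h, ih]
      have hn : t ∉ s.toList := by simpa using h
      simp [hn]

theorem solutionChar_eq (keymap : List String) (t : Char) :
    solutionChar keymap t = (bestFold t keymap 101, keymap.any (fun s => s.toList.contains t)) := by
  have h1 : solutionChar keymap t = keymap.foldl (f2 t) (101, false) := by
    unfold solutionChar
    rw [← PySem.List.foldl_pyRange_zero_pyGetD keymap "" (f2 t) ((101 : Int), false)]
    rfl
  rw [h1, pairFold]
  simp

-- B-side string fold characterisation
theorem strFold_getD (cs : List Char) (i : Int) (tb : PySem.Dict Char Int) (c : Char) :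
    ((PySem.List.enumerate cs i).foldl
        (fun (tb : PySem.Dict Char Int) p => tb.insert p.2 (min (tb.getD p.2 101) (p.1 + 1))) tb).getD c 101
      = if cs.contains c then min (tb.getD c 101) (i + (cs.idxOf c : Int) + 1) else tb.getD c 101 := by
  induction cs generalizing i tb with
  | nil => simp [PySem.List.enumerate_nil]
  | cons d rest ih =>
    rw [PySem.List.enumerate_cons, List.foldl_cons, ih, PySem.Dict.getD_insert]
    have h0 : (0 : Int) ≤ (rest.idxOf c : Int) := Int.natCast_nonneg _
    by_cases hd : c = d <;> by_cases hr : c ∈ rest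
    · subst hd; simp only [List.idxOf_cons_self, List.contains_cons]
      simp; omega
    · subst hd; simp only [List.idxOf_cons_self, List.contains_cons]
      simp [hr]
    · have hix : (d :: rest).idxOf c = rest.idxOf c + 1 := by
        rw [List.idxOf_cons_ne]; simpa using fun h => hd h.symm
      simp only [List.contains_cons, hix]
      simp [hr, hd]
      omega
    · simp [hr, hd]

theorem strFold_contains (cs : List Char) (i : Int) (tb : PySem.Dict Char Int) (c : Char) :
    ((PySem.List.enumerate cs i).foldl
        (fun (tb : PySem.Dict Char Int) p => tb.insert p.2 (min (tb.getD p.2 101) (p.1 + 1))) tb).contains c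
      = (tb.contains c || cs.contains c) := by
  induction cs generalizing i tb with
  | nil => simp [PySem.List.enumerate_nil]
  | cons d rest ih =>
    rw [PySem.List.enumerate_cons, List.foldl_cons, ih]
    by_cases hd : c = d <;> cases htb : tb.contains c <;>
      simp [PySem.Dict.contains_insert, hd, htb]

-- lifting through the outer keymap fold
theorem tableFold_getD (keymap : List String) (tb : PySem.Dict Char Int) (c : Char) :
    (keymap.foldl
        (fun tb s =>
          (PySem.List.enumerate s.toList 0).foldl
            (fun (tb : PySem.Dict Char Int) p => tb.insert p.2 (min (tb.getD p.2 101) (p.1 + 1))) tb)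
        tb).getD c 101 = bestFold c keymap (tb.getD c 101) := by
  induction keymap generalizing tb with
  | nil => simp [bestFold]
  | cons s l ih =>
    rw [List.foldl_cons, ih, strFold_getD]
    simp only [bestFold, List.foldl_cons]
    by_cases h : s.toList.contains c
    · rw [if_pos h, if_pos h, min_comm]
      norm_num
    · rw [if_neg h, if_neg h]

theorem tableFold_contains (keymap : List String) (tb : PySem.Dict Char Int) (c : Char) :
    (keymap.foldl
        (fun tb s =>
          (PySem.List.enumerate s.toList 0).foldl
            (fun (tb : PySem.Dict Char Int) p => tb.insert p.2 (min (tb.getD p.2 101) (p.1 + 1))) tb)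
        tb).contains c = (tb.contains c || keymap.any (fun s => s.toList.contains c)) := by
  induction keymap generalizing tb with
  | nil => simp
  | cons s l ih =>
    rw [List.foldl_cons, ih, strFold_contains]
    simp [Bool.or_assoc]

theorem altTable_getD (keymap : List String) (c : Char) :
    (altTable keymap).getD c 101 = bestFold c keymap 101 := by
  unfold altTable
  rw [tableFold_getD]
  simp

theorem altTable_contains (keymap : List String) (c : Char) :
    (altTable keymap).contains c = keymap.any (fun s => s.toList.contains c) := by
  unfold altTable
  rw [tableFold_contains]
  simp

theorem solutionChar_table (keymap : List String) (t : Char) :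
    solutionChar keymap t = ((altTable keymap).getD t 101, (altTable keymap).contains t) := by
  rw [solutionChar_eq, altTable_getD, altTable_contains]

theorem solutionTabs_eq (keymap : List String) (cs : List Char) (tabs : Int) :
    solutionTabs keymap cs tabs =
      (if cs.all (fun ch => (altTable keymap).contains ch) then
        tabs + (cs.map (fun ch => (altTable keymap).getD ch 101)).sum
      else -1) := by
  induction cs generalizing tabs with
  | nil => simp [solutionTabs]
  | cons t rest ih =>
    rw [solutionTabs, solutionChar_table]
    cases hf : (altTable keymap).contains t
    · simp [hf]
    · simp only [Bool.not_true, Bool.false_eq_true, if_false]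
      rw [ih]
      simp only [List.all_cons, hf, Bool.true_and, List.map_cons, List.sum_cons]
      by_cases h : rest.all (fun ch => (altTable keymap).contains ch)
      · rw [if_pos h, if_pos h]; ring
      · rw [if_neg h, if_neg h]

-- ===== VERDICT (by name: the statement is the Claim_ definition above) =====
theorem solution_spec : Claim_equal_solution := by
  intro keymap targets _
  unfold Spec_solution solution solution_alt
  rw [PySem.List.foldl_append_singleton_eq_map]
  exact List.map_congr_left fun t _ => by rw [solutionTabs_eq]; simp
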